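-- pv_equiv track=rewrite | github.com/dhetting/sabench | scripts/fix_notebooks.py | to_source
-- ===== SOURCE A (Python) =====
-- def to_source(code: str) -> list[str]:
--     """Convert a multiline string to notebook source list."""
--     lines = code.split("\n")
--     result = []
--     for i, line in enumerate(lines):
--         if i < len(lines) - 1:
--             result.append(line + "\n")
--         else:
--             if line:  # only add last line if non-empty
--                 result.append(line)
--     return result
-- ===== SOURCE B (Python) =====
-- import re
--
-- def to_source(code: str) -> list[str]:
--     """Convert a multiline string to notebook source list."""
--     return re.findall(r"[^\n]*\n|[^\n]+", code)
-- ===== Notes on version B (the rewrite author's own statement) =====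
-- stated objective: idiomatic
-- what changed: B tokenizes the string with one regex findall (newline-terminated runs, or a bare trailing run) instead of splitting on newlines and looping with enumerate/len-1 index bookkeeping.
import Mathlib
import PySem

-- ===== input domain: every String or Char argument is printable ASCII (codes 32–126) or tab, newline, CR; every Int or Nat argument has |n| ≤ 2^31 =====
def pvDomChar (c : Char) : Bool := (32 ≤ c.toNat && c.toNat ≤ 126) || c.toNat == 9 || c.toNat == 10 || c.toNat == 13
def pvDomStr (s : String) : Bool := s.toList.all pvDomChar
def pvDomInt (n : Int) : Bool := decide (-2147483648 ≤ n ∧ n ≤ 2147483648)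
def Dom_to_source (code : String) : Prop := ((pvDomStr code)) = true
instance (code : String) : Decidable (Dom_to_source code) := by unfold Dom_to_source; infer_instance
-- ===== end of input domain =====

-- B replaces A's split/enumerate/len-1 loop by a single regex-style tokenizer
-- (runs of non-newline characters, newline-terminated or bare at the end); idiomatic, same cost.

-- ===== PORT A =====
-- A, transliterated at the List Char level: split on "\n", then the enumerate loop
-- appending line+"\n" for all but the last index and the bare last line if non-empty.
def to_source (code : String) : List String :=
  let lines : List (List Char) := PySem.Chars.splitOn code.toList "\n".toList
  ((PySem.List.enumerate lines 0).foldl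
    (fun result p =>
      if p.1 < (lines.length : Int) - 1 then result ++ [p.2 ++ ['\n']]
      else if p.2 ≠ [] then result ++ [p.2] else result) []).map String.ofList

-- ===== PORT B =====
-- B's regex r"[^\n]*\n|[^\n]+" as a left-to-right tokenizer: `acc` is the current
-- run of non-newline characters (reversed); a '\n' closes a newline-terminated
-- token, the end of input emits the trailing run only if non-empty.
def pvScanB : List Char → List Char → List (List Char)
  | acc, [] => if acc = [] then [] else [acc.reverse]
  | acc, c :: rest =>
      if c = '\n' then (acc.reverse ++ ['\n']) :: pvScanB [] rest
      else pvScanB (c :: acc) rest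

def to_source_alt (code : String) : List String :=
  (pvScanB [] code.toList).map String.ofList

-- ===== PRECONDITION & SPEC =====
def Spec_to_source (code : String) (out : List String) : Prop := out = to_source_alt code
instance (code : String) (out : List String) : Decidable (Spec_to_source code out) := by unfold Spec_to_source; infer_instance

-- ===== CLAIM (what is proved, stated in full; the proofs are below) =====
def Claim_equal_to_source : Prop := ∀ (code : String), Dom_to_source code → Spec_to_source code (to_source code)

-- ===== LEMMAS AND PROOFS =====

-- split on '\n' with an accumulator (cur is the current piece, reversed)
def pvSp : List Char → List Char → List (List Char)
  | cur, [] => [cur.reverse]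
  | cur, c :: rest =>
      if c = '\n' then cur.reverse :: pvSp [] rest else pvSp (c :: cur) rest

theorem pvSp_ne_nil (cur cs : List Char) : pvSp cur cs ≠ [] := by
  induction cs generalizing cur with
  | nil => simp [pvSp]
  | cons c rest ih =>
    simp only [pvSp]
    split_ifs
    · simp
    · exact ih _

theorem splitOn_go_eq (cs : List Char) :
    ∀ (fuel : Nat), cs.length ≤ fuel → ∀ (cur : List Char) (acc : List (List Char)),
      PySem.Chars.splitOn.go ['\n'] fuel cs cur acc = acc.reverse ++ pvSp cur cs := by
  induction cs with
  | nil =>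
    intro fuel _ cur acc
    cases fuel <;> simp [PySem.Chars.splitOn.go, pvSp]
  | cons c rest ih =>
    intro fuel hf cur acc
    cases fuel with
    | zero => simp at hf
    | succ f =>
      by_cases hc : c = '\n'
      · subst hc
        have hpre : List.isPrefixOf ['\n'] ('\n' :: rest) = true := by
          simp [List.isPrefixOf]
        simp only [PySem.Chars.splitOn.go, hpre, if_pos, List.length_cons, List.drop_succ_cons,
          List.length_nil, List.drop_zero]
        rw [ih f (by simpa using hf) [] (cur.reverse :: acc)]
        simp [pvSp]
      · have hpre : List.isPrefixOf ['\n'] (c :: rest) = false := by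
          simp [List.isPrefixOf]
          intro h; exact absurd h.symm hc
        simp only [PySem.Chars.splitOn.go, hpre]
        rw [if_neg (by simp)]
        rw [ih f (by simpa using Nat.succ_le_succ_iff.mp hf) (c :: cur) acc]
        simp [pvSp, hc]

theorem splitOn_eq_pvSp (cs : List Char) :
    PySem.Chars.splitOn cs "\n".toList = pvSp [] cs := by
  have : "\n".toList = ['\n'] := by decide
  rw [this, PySem.Chars.splitOn, splitOn_go_eq cs (cs.length + 1) (Nat.le_succ _) [] []]
  simp

-- the loop body of A's fold, characterised structurally against the LAST position
def pvEmit : List (List Char) → List (List Char)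
  | [] => []
  | l :: rest =>
      match rest with
      | [] => if l = [] then [] else [l]
      | _ :: _ => (l ++ ['\n']) :: pvEmit rest

-- A's fold with the index test, unrolled with a running start index s
def pvEmitN (N : Int) : List (List Char) → Int → List (List Char)
  | [], _ => []
  | line :: rest, s =>
      (if s < N - 1 then [line ++ ['\n']] else if line ≠ [] then [line] else [])
        ++ pvEmitN N rest (s + 1)

theorem foldA_eq (N : Int) (l : List (List Char)) :
    ∀ (s : Int) (acc : List (List Char)),
      (PySem.List.enumerate l s).foldl
        (fun result p =>
          if p.1 < N - 1 then result ++ [p.2 ++ ['\n']]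
          else if p.2 ≠ [] then result ++ [p.2] else result) acc
      = acc ++ pvEmitN N l s := by
  induction l with
  | nil => intro s acc; simp [PySem.List.enumerate_nil, pvEmitN]
  | cons line rest ih =>
    intro s acc
    rw [PySem.List.enumerate_cons, List.foldl_cons, ih]
    simp only [pvEmitN]
    split_ifs <;> simp

theorem pvEmitN_eq_pvEmit (N : Int) (l : List (List Char)) :
    ∀ (s : Int), s + l.length = N → pvEmitN N l s = pvEmit l := by
  induction l with
  | nil => intro s _; rfl
  | cons line rest ih =>
    intro s hs
    simp only [pvEmitN, pvEmit]
    cases rest with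
    | nil =>
      have : ¬ s < N - 1 := by simp at hs; omega
      rw [if_neg this]
      split_ifs <;> simp_all [pvEmitN]
    | cons r rs =>
      have hlt : s < N - 1 := by simp at hs; omega
      rw [if_pos hlt, ih (s + 1) (by simp at hs ⊢; omega)]
      simp

theorem pvEmit_pvSp (cs : List Char) :
    ∀ (cur : List Char), pvEmit (pvSp cur cs) = pvScanB cur cs := by
  induction cs with
  | nil =>
    intro cur
    simp only [pvSp, pvEmit, pvScanB]
    split_ifs with h1 h2 h2 <;> simp_all
  | cons c rest ih =>
    intro cur
    simp only [pvSp, pvScanB]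
    by_cases hc : c = '\n'
    · rw [if_pos hc, if_pos hc]
      obtain ⟨x, xs, hx⟩ : ∃ x xs, pvSp ([] : List Char) rest = x :: xs := by
        cases h : pvSp ([] : List Char) rest with
        | nil => exact absurd h (pvSp_ne_nil _ _)
        | cons x xs => exact ⟨x, xs, rfl⟩
      have := ih ([] : List Char)
      rw [hx] at this ⊢
      rw [show pvEmit (cur.reverse :: x :: xs) = (cur.reverse ++ ['\n']) :: pvEmit (x :: xs) from rfl, this]
    · rw [if_neg hc, if_neg hc]
      exact ih (c :: cur)

theorem to_source_eq_chars (code : String) :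
    to_source code = (pvEmit (pvSp [] code.toList)).map String.ofList := by
  unfold to_source
  simp only [splitOn_eq_pvSp]
  rw [foldA_eq, pvEmitN_eq_pvEmit _ _ 0 (by simp)]
  simp

-- ===== VERDICT (by name: the statement is the Claim_ definition above) =====
theorem to_source_spec : Claim_equal_to_source := by
  intro code _
  unfold Spec_to_source to_source_alt
  rw [to_source_eq_chars, pvEmit_pvSp]
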